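-- pv_equiv track=rewrite | github.com/zzf-damon/python | writtenTest/旋转密码.py | rotatePassword
-- ===== SOURCE A (Python) =====
-- def transpose(matrix):
--     n = len(matrix[0])
--     rem = []
--     matrix_tem = []
--     for i in range(n):
--         for k, key in enumerate(matrix[i]):
--             if key == "0":
--                 rem.append((i, k))
--         matrix_tem.append([j for j in matrix[i]])
--
--     for i in range(n):
--         for j in range(i, n):
--             matrix_tem[j][i], matrix_tem[i][j] = matrix_tem[i][j], matrix_tem[j][i]
--
--     for i in range(n):
--         matrix_tem[i].reverse()
--
--     return matrix_tem, rem
--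
-- def rotatePassword(s1, s2):
--     res_list = []
--     for _ in range(4):
--         s1, rem = transpose(s1)
--         res_list += rem
--     res_str = ""
--
--     for j, k in res_list:
--         res_str += s2[j][k]
--
--     return res_str
-- ===== SOURCE B (Python) =====
-- def rotatePassword(s1, s2):
--     n = len(s1[0])
--     maps = [
--         lambda i, k: (i, k),
--         lambda i, k: (n - 1 - k, i),
--         lambda i, k: (n - 1 - i, n - 1 - k),
--         lambda i, k: (k, n - 1 - i),
--     ]
--     out = []
--     for f in maps:
--         for i in range(n):
--             for k in range(n):
--                 a, b = f(i, k)
--                 if s1[a][b] == "0":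
--                     out.append(s2[i][k])
--     return "".join(out)
-- ===== Notes on version B (the rewrite author's own statement) =====
-- stated objective: simpler
-- what changed: B builds no rotated matrix copies at all: instead of four rounds of copy-transpose-reverse it reads the original grid through the closed-form index map of each of the four orientations ((i,k), (n-1-k,i), (n-1-i,n-1-k), (k,n-1-i)) and appends s2[i][k] at each zero.
import Mathlib
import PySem

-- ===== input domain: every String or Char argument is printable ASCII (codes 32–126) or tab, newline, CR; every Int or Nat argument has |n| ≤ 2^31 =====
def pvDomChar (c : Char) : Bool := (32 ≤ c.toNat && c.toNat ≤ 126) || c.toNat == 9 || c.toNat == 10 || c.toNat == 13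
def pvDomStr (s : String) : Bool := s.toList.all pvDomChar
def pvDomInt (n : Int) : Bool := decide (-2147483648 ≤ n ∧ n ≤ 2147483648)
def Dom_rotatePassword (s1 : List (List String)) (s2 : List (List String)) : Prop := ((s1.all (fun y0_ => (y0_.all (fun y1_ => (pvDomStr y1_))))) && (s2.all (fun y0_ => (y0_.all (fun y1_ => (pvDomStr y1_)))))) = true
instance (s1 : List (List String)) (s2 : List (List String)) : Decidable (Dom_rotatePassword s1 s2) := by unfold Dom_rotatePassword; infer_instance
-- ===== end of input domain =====

-- B reads the original grid through closed-form index maps of the four orientations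
-- instead of building four rotated matrix copies (objective: simpler; return value only).


-- ===== PORT A =====
-- matrix cell read t[a][b]; exact under Pre_ (all indices used are in range)
def getE (t : List (List String)) (a b : Nat) : String := (t.getD a []).getD b ""
-- matrix cell write t[a][b] = v
def setE (t : List (List String)) (a b : Nat) (v : String) : List (List String) :=
  t.modify a (fun row => row.set b v)
-- 'matrix_tem[j][i], matrix_tem[i][j] = matrix_tem[i][j], matrix_tem[j][i]' (RHS first, then the two stores)
def swapStep (t : List (List String)) (i j : Nat) : List (List String) :=
  let x := getE t i j
  let y := getE t j i
  setE (setE t j i x) i j y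

def transposeA (matrix : List (List String)) : List (List String) × List (Nat × Nat) :=
  let n := (matrix.headD []).length        -- len(matrix[0]); exact under Pre_ (matrix nonempty)
  -- first loop: collect zero positions and copy rows
  let p := (List.range n).foldl
    (fun (acc : List (List String) × List (Nat × Nat)) i =>
      let row := matrix.getD i []          -- matrix[i]; in range under Pre_
      (acc.1 ++ [row.map (fun j => j)],
       acc.2 ++ row.zipIdx.filterMap (fun q => if q.1 = "0" then some (i, q.2) else none)))
    ([], [])
  -- second loop: in-place transpose by swaps
  let tem := (List.range n).foldl
    (fun t i => (List.range' i (n - i)).foldl (fun t' j => swapStep t' i j) t) p.1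
  -- third loop reverses matrix_tem[i] for i in range(n); matrix_tem has exactly n rows
  (tem.map List.reverse, p.2)

def rotatePassword (s1 : List (List String)) (s2 : List (List String)) : String :=
  let st := (List.range 4).foldl
    (fun (acc : List (List String) × List (Nat × Nat)) _ =>
      let p := transposeA acc.1
      (p.1, acc.2 ++ p.2)) (s1, [])
  st.2.foldl (fun s q => s ++ getE s2 q.1 q.2) ""   -- s2[j][k]; in range under Pre_

-- ===== PORT B =====
-- the four lambdas of Source B's 'maps', indexed by orientation r = 0..3
def rotMapB (n r i k : Nat) : Nat × Nat :=
  match r with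
  | 0 => (i, k)
  | 1 => (n - 1 - k, i)
  | 2 => (n - 1 - i, n - 1 - k)
  | _ => (k, n - 1 - i)

def rotatePassword_alt (s1 : List (List String)) (s2 : List (List String)) : String :=
  let n := (s1.headD []).length            -- len(s1[0]); exact under Pre_ (s1 nonempty)
  let out := (List.range 4).foldl (fun out r =>
    (List.range n).foldl (fun out i =>
      (List.range n).foldl (fun out k =>
        let q := rotMapB n r i k
        if getE s1 q.1 q.2 = "0" then out ++ [getE s2 i k] else out) out) out) []
  String.join out

-- ===== PRECONDITION & SPEC =====
-- Pre_ restricts to the natural domain of a 4-fold matrix rotation: with n = len(s1[0]) ≥ 1,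
-- the first n rows of s1 form an exact n×n square block (A raises IndexError when rows are
-- shorter or fewer; on rows longer than n A still returns, but its full-row reverse mixes the
-- ragged tails into the rotation — outside the rotation's domain, see claim cites), and s2[i][k]
-- must exist at every collected zero position (otherwise A raises IndexError).
def Pre_rotatePassword (s1 : List (List String)) (s2 : List (List String)) : Prop :=
  let n := (s1.headD []).length
  1 ≤ n ∧ n ≤ s1.length ∧
  (∀ i, i < n → (s1.getD i []).length = n) ∧
  (∀ i, i < n → ∀ k, k < n →
    ((s1.getD i []).getD k "" = "0" ∨
     (s1.getD (n - 1 - k) []).getD i "" = "0" ∨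
     (s1.getD (n - 1 - i) []).getD (n - 1 - k) "" = "0" ∨
     (s1.getD k []).getD (n - 1 - i) "" = "0") →
    i < s2.length ∧ k < (s2.getD i []).length)
instance (s1 : List (List String)) (s2 : List (List String)) : Decidable (Pre_rotatePassword s1 s2) := by
  unfold Pre_rotatePassword; infer_instance

def pvWitness_rotatePassword : List (List String) × List (List String) := ([["0"]], [["a"]])

def Spec_rotatePassword (s1 : List (List String)) (s2 : List (List String)) (out : String) : Prop := out = rotatePassword_alt s1 s2
instance (s1 : List (List String)) (s2 : List (List String)) (out : String) : Decidable (Spec_rotatePassword s1 s2 out) := by unfold Spec_rotatePassword; infer_instance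

-- ===== CLAIM (what is proved, stated in full; the proofs are below) =====
def Claim_equal_rotatePassword : Prop := ∀ (s1 : List (List String)) (s2 : List (List String)), Dom_rotatePassword s1 s2 → Pre_rotatePassword s1 s2 → Spec_rotatePassword s1 s2 (rotatePassword s1 s2)

-- ===== LEMMAS AND PROOFS =====

theorem getD_eq_getElem? {α : Type} (l : List α) (i : Nat) (d : α) : l.getD i d = l[i]?.getD d := by
  simp [List.getD]

theorem length_setE (t : List (List String)) (a b : Nat) (v : String) :
    (setE t a b v).length = t.length := by
  simp [setE]

theorem rowLen_setE (t : List (List String)) (a b : Nat) (v : String) (c : Nat) :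
    ((setE t a b v).getD c []).length = ((t.getD c []).length) := by
  simp only [setE, getD_eq_getElem?, List.getElem?_modify]
  cases h : t[c]? with
  | none => by_cases hac : a = c <;> simp [hac]
  | some row => by_cases hac : a = c <;> simp [hac]

theorem getE_setE_self (t : List (List String)) (a b : Nat) (v : String)
    (ha : a < t.length) (hb : b < (t.getD a []).length) :
    getE (setE t a b v) a b = v := by
  have h : t[a]? = some t[a] := List.getElem?_eq_getElem ha
  have hb' : b < t[a].length := by
    simpa [getD_eq_getElem?, h] using hb
  simp [getE, setE, h, hb']

theorem getE_setE_ne (t : List (List String)) (a b : Nat) (v : String) (c d : Nat)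
    (h : ¬(c = a ∧ d = b)) :
    getE (setE t a b v) c d = getE t c d := by
  by_cases hac : a = c
  · subst hac
    have hdb : d ≠ b := by tauto
    simp only [getE, setE, getD_eq_getElem?, List.getElem?_modify]
    cases ht : t[a]? with
    | none => simp
    | some row => simp [Ne.symm hdb]
  · simp [getE, setE, hac]

theorem length_swapStep (t : List (List String)) (i j : Nat) :
    (swapStep t i j).length = t.length := by
  simp [swapStep, length_setE]

theorem rowLen_swapStep (t : List (List String)) (i j c : Nat) :
    ((swapStep t i j).getD c []).length = ((t.getD c []).length) := by
  simp only [swapStep]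
  rw [rowLen_setE, rowLen_setE]

theorem getE_swapStep (t : List (List String)) (i j : Nat)
    (hi : i < t.length) (hj : j < t.length)
    (hri : j < (t.getD i []).length) (hrj : i < (t.getD j []).length)
    (a b : Nat) :
    getE (swapStep t i j) a b =
      if a = i ∧ b = j then getE t j i
      else if a = j ∧ b = i then getE t i j
      else getE t a b := by
  simp only [swapStep]
  by_cases h1 : a = i ∧ b = j
  · rw [if_pos h1]
    obtain ⟨rfl, rfl⟩ := h1
    rw [getE_setE_self]
    · rw [length_setE]; exact hi
    · rw [rowLen_setE]; exact hri
  · rw [if_neg h1]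
    by_cases h2 : a = j ∧ b = i
    · rw [if_pos h2]
      obtain ⟨rfl, rfl⟩ := h2
      rw [getE_setE_ne _ _ _ _ _ _ h1]
      exact getE_setE_self t a b _ hj hrj
    · rw [if_neg h2, getE_setE_ne _ _ _ _ _ _ h1, getE_setE_ne _ _ _ _ _ _ h2]

-- exact n×n square shape
def SqE (n : Nat) (t : List (List String)) : Prop :=
  t.length = n ∧ ∀ i, i < n → (t.getD i []).length = n

theorem SqE_swapStep {n : Nat} {t : List (List String)} (h : SqE n t) (i j : Nat) :
    SqE n (swapStep t i j) := by
  obtain ⟨h1, h2⟩ := h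
  exact ⟨by simp [length_swapStep, h1], fun c hc => by rw [rowLen_swapStep]; exact h2 c hc⟩

theorem innerLoop (n i : Nat) (hi : i < n) :
    ∀ (c j0 : Nat) (u : List (List String)), j0 + c = n → i ≤ j0 → SqE n u →
      SqE n ((List.range' j0 c).foldl (fun t j => swapStep t i j) u) ∧
      (∀ a b, a < n → b < n →
        getE ((List.range' j0 c).foldl (fun t j => swapStep t i j) u) a b =
          if (a = i ∧ j0 ≤ b) ∨ (b = i ∧ j0 ≤ a) then getE u b a else getE u a b) := by
  intro c
  induction c with
  | zero =>
    intro j0 u hc hij hsq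
    refine ⟨by simpa using hsq, ?_⟩
    intro a b ha hb
    have : ¬((a = i ∧ j0 ≤ b) ∨ (b = i ∧ j0 ≤ a)) := by omega
    simp [this]
  | succ c ih =>
    intro j0 u hc hij hsq
    have hj0 : j0 < n := by omega
    have hu' : SqE n (swapStep u i j0) := SqE_swapStep hsq i j0
    have step := ih (j0 + 1) (swapStep u i j0) (by omega) (by omega) hu'
    have hrange : List.range' j0 (c + 1) = j0 :: List.range' (j0 + 1) c := by
      simp [List.range'_succ]
    refine ⟨by rw [hrange]; exact step.1, ?_⟩
    intro a b ha hb
    rw [hrange, List.foldl_cons]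
    have hswap : ∀ x y, x < n → y < n →
        getE (swapStep u i j0) x y =
          if x = i ∧ y = j0 then getE u j0 i
          else if x = j0 ∧ y = i then getE u i j0
          else getE u x y := by
      intro x y hx hy
      exact getE_swapStep u i j0 (by rw [hsq.1]; omega) (by rw [hsq.1]; omega)
        (by rw [hsq.2 i hi]; omega) (by rw [hsq.2 j0 hj0]; omega) x y
    rw [step.2 a b ha hb]
    by_cases hcase : (a = i ∧ j0 + 1 ≤ b) ∨ (b = i ∧ j0 + 1 ≤ a)
    · rw [if_pos hcase, hswap b a hb ha]
      have hc' : (a = i ∧ j0 ≤ b) ∨ (b = i ∧ j0 ≤ a) := by omega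
      rw [if_pos hc']
      rcases hcase with ⟨rfl, hb'⟩ | ⟨rfl, ha'⟩
      · rw [if_neg (by omega : ¬(b = a ∧ a = j0)), if_neg (by omega : ¬(b = j0 ∧ a = a))]
      · rw [if_neg (by omega : ¬(b = b ∧ a = j0)), if_neg (by omega : ¬(b = j0 ∧ a = b))]
    · rw [if_neg hcase, hswap a b ha hb]
      by_cases hab1 : a = i ∧ b = j0
      · obtain ⟨rfl, rfl⟩ := hab1
        rw [if_pos ⟨rfl, rfl⟩, if_pos (Or.inl ⟨rfl, le_refl b⟩)]
      · rw [if_neg hab1]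
        by_cases hab2 : a = j0 ∧ b = i
        · obtain ⟨rfl, rfl⟩ := hab2
          rw [if_pos ⟨rfl, rfl⟩, if_pos (Or.inr ⟨rfl, le_refl a⟩)]
        · rw [if_neg hab2]
          have hc' : ¬((a = i ∧ j0 ≤ b) ∨ (b = i ∧ j0 ≤ a)) := by omega
          rw [if_neg hc']

theorem outerLoop (n : Nat) :
    ∀ (m : Nat) (u : List (List String)), m ≤ n → SqE n u →
      SqE n ((List.range m).foldl
        (fun t i => (List.range' i (n - i)).foldl (fun t' j => swapStep t' i j) t) u) ∧
      (∀ a b, a < n → b < n →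
        getE ((List.range m).foldl
          (fun t i => (List.range' i (n - i)).foldl (fun t' j => swapStep t' i j) t) u) a b =
          if a < m ∨ b < m then getE u b a else getE u a b) := by
  intro m
  induction m with
  | zero => intro u _ hsq; refine ⟨by simpa using hsq, ?_⟩; intro a b _ _; simp
  | succ m ih =>
    intro u hm hsq
    have ihm := ih u (by omega) hsq
    rw [List.range_succ]
    simp only [List.foldl_append, List.foldl_cons, List.foldl_nil]
    set v := (List.range m).foldl
      (fun t i => (List.range' i (n - i)).foldl (fun t' j => swapStep t' i j) t) u with hv
    have hinner := innerLoop n m (by omega) (n - m) m v (by omega) (le_refl m) ihm.1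
    refine ⟨hinner.1, ?_⟩
    intro a b ha hb
    rw [hinner.2 a b ha hb]
    by_cases hcase : (a = m ∧ m ≤ b) ∨ (b = m ∧ m ≤ a)
    · rw [if_pos hcase, ihm.2 b a hb ha]
      rw [if_neg (by omega : ¬(b < m ∨ a < m)), if_pos (by omega : a < m + 1 ∨ b < m + 1)]
    · rw [if_neg hcase, ihm.2 a b ha hb]
      by_cases h3 : a < m ∨ b < m
      · rw [if_pos h3, if_pos (by omega : a < m + 1 ∨ b < m + 1)]
      · rw [if_neg h3, if_neg (by omega : ¬(a < m + 1 ∨ b < m + 1))]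

-- first loop of transpose: pair accumulator
theorem foldl_pair_append {α β γ : Type} (f : α → β) (g : α → List γ) :
    ∀ (l : List α) (L : List β) (R : List γ),
      l.foldl (fun acc x => (acc.1 ++ [f x], acc.2 ++ g x)) (L, R) =
        (L ++ l.map f, R ++ l.flatMap g) := by
  intro l
  induction l with
  | nil => intro L R; simp
  | cons x xs ih => intro L R; simp [ih]

theorem zipIdx_filterMap {γ : Type} (F : String → Nat → Option γ) :
    ∀ (xs : List String) (o : Nat),
      (xs.zipIdx o).filterMap (fun q => F q.1 q.2) =
        (List.range xs.length).filterMap (fun k => F (xs.getD k "") (k + o)) := by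
  intro xs
  induction xs with
  | nil => intro o; simp
  | cons x xs ih =>
    intro o
    rw [List.zipIdx_cons, List.length_cons, List.range_succ_eq_map]
    rw [List.filterMap_cons, List.filterMap_cons]
    have htail : (List.filterMap (fun k => F ((x :: xs).getD k "") (k + o))
          ((List.range xs.length).map (fun i => i + 1))) =
        List.filterMap (fun q => F q.1 q.2) (xs.zipIdx (o + 1)) := by
      rw [List.filterMap_map, ih (o + 1)]
      apply List.filterMap_congr
      intro k _
      simp only [Function.comp]
      have hgd : (x :: xs).getD (k + 1) "" = xs.getD k "" := by simp [List.getD]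
      rw [hgd]
      congr 1
      omega
    have hhead : ((x :: xs).getD 0 "") = x := rfl
    simp only [hhead, Nat.zero_add]
    rw [htail]

-- getD of map-over-range
theorem getD_map_range {α : Type} (g : Nat → α) (n a : Nat) (d : α) (ha : a < n) :
    (((List.range n).map g).getD a d) = g a := by
  rw [getD_eq_getElem?]
  rw [List.getElem?_map]
  simp [ha]

theorem getD_reverse (l : List String) (b : Nat) (hb : b < l.length) :
    l.reverse.getD b "" = l.getD (l.length - 1 - b) "" := by
  rw [getD_eq_getElem?, getD_eq_getElem?,
    List.getElem?_eq_getElem (by simpa using hb : b < l.reverse.length),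
    List.getElem?_eq_getElem (by omega : l.length - 1 - b < l.length)]
  simp [List.getElem_reverse]

-- characterisation of one transposeA round on an exact square
theorem transposeA_spec (n : Nat) (_hn1 : 1 ≤ n) (t : List (List String))
    (hhead : (t.headD []).length = n) (_hlen : n ≤ t.length)
    (hrows : ∀ i, i < n → (t.getD i []).length = n) :
    SqE n (transposeA t).1 ∧
    (∀ a b, a < n → b < n → getE (transposeA t).1 a b = getE t (n - 1 - b) a) ∧
    (transposeA t).2 = (List.range n).flatMap (fun i =>
      (List.range n).filterMap (fun k => if getE t i k = "0" then some (i, k) else none)) := by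
  have htem0 : SqE n ((List.range n).map (fun i => t.getD i [])) := by
    constructor
    · simp
    · intro i hi
      rw [getD_map_range _ n i [] hi]
      exact hrows i hi
  have houter := outerLoop n n ((List.range n).map (fun i => t.getD i [])) (le_refl n) htem0
  simp only [transposeA, hhead, foldl_pair_append]
  have hmapid : (fun i => (t.getD i []).map (fun j => j)) = (fun i => t.getD i []) := by
    funext i; simp
  rw [hmapid]
  simp only [List.nil_append]
  set w := (List.range n).foldl
    (fun t' i => (List.range' i (n - i)).foldl (fun t'' j => swapStep t'' i j) t')
    ((List.range n).map fun i => t.getD i []) with hw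
  refine ⟨?_, ?_, ?_⟩
  · constructor
    · simp [houter.1.1]
    · intro i hi
      rw [getD_eq_getElem?, List.getElem?_map]
      have hiw : i < w.length := by rw [houter.1.1]; exact hi
      rw [List.getElem?_eq_getElem hiw]
      simp only [Option.map_some, Option.getD_some, List.length_reverse]
      have := houter.1.2 i hi
      rw [getD_eq_getElem?, List.getElem?_eq_getElem hiw] at this
      simpa using this
  · intro a b ha hb
    have haw : a < w.length := by rw [houter.1.1]; exact ha
    have hrowa : (w.getD a []).length = n := houter.1.2 a ha
    have hget : (w.map List.reverse).getD a [] = (w.getD a []).reverse := by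
      rw [getD_eq_getElem?, getD_eq_getElem?, List.getElem?_map, List.getElem?_eq_getElem haw]
      simp
    simp only [getE]
    rw [hget, getD_reverse _ b (by rw [hrowa]; exact hb), hrowa]
    have h1 : getE w a (n - 1 - b) = getE t (n - 1 - b) a := by
      rw [houter.2 a (n - 1 - b) ha (by omega), if_pos (by omega : a < n ∨ n - 1 - b < n)]
      simp only [getE]
      congr 1
      exact getD_map_range (fun i => t.getD i []) n (n - 1 - b) [] (by omega)
    exact h1
  · apply List.flatMap_congr
    intro i hi
    rw [List.mem_range] at hi
    rw [zipIdx_filterMap (fun s k => if s = "0" then some (i, k) else none) (t.getD i []) 0,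
      hrows i hi]
    apply List.filterMap_congr
    intro k _
    simp [getE]

theorem string_foldl_shift :
    ∀ (l : List String) (s : String), l.foldl (fun a b => a ++ b) s = s ++ l.foldl (fun a b => a ++ b) "" := by
  intro l
  induction l with
  | nil => intro s; simp
  | cons x xs ih =>
    intro s
    simp only [List.foldl_cons]
    rw [ih (s ++ x), ih ("" ++ x)]
    simp [String.append_assoc]

theorem string_join_cons (x : String) (xs : List String) :
    String.join (x :: xs) = x ++ String.join xs := by
  simp only [String.join, List.foldl_cons]
  rw [string_foldl_shift xs ("" ++ x)]
  simp

-- fold of string appends = join of the mapped list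
theorem foldl_append_join {α : Type} (f : α → String) :
    ∀ (l : List α) (s : String), l.foldl (fun acc q => acc ++ f q) s = s ++ String.join (l.map f) := by
  intro l
  induction l with
  | nil => intro s; simp [String.join]
  | cons x xs ih =>
    intro s
    simp only [List.foldl_cons, List.map_cons, string_join_cons]
    rw [ih]
    simp [String.append_assoc]

theorem foldl_append_ite {α β : Type} (P : α → Prop) [DecidablePred P] (f : α → β) (l : List α) :
    ∀ acc, l.foldl (fun acc x => if P x then acc ++ [f x] else acc) acc
      = acc ++ l.filterMap (fun x => if P x then some (f x) else none) := by
  induction l with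
  | nil => intro acc; simp
  | cons x xs ih =>
    intro acc
    by_cases h : P x <;> simp [h, ih]

theorem foldl_congr_fn {α β : Type} (f g : β → α → β) (l : List α) (init : β)
    (h : ∀ acc x, x ∈ l → f acc x = g acc x) : l.foldl f init = l.foldl g init := by
  induction l generalizing init with
  | nil => rfl
  | cons x xs ih =>
    simp only [List.foldl_cons]
    rw [h init x (List.mem_cons_self), ih]
    intro acc y hy
    exact h acc y (List.mem_cons_of_mem _ hy)

-- the inner k-loop of B as a filterMap
theorem bInner (s1 s2 : List (List String)) (n r i : Nat) (out : List String) :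
    (List.range n).foldl (fun out k =>
        if getE s1 (rotMapB n r i k).1 (rotMapB n r i k).2 = "0"
        then out ++ [getE s2 i k] else out) out =
      out ++ (List.range n).filterMap (fun k =>
        if getE s1 (rotMapB n r i k).1 (rotMapB n r i k).2 = "0"
        then some (getE s2 i k) else none) := by
  exact foldl_append_ite _ _ _ out

theorem bLoops (s1 s2 : List (List String)) :
    rotatePassword_alt s1 s2 = String.join ((List.range 4).flatMap (fun r =>
      (List.range ((s1.headD []).length)).flatMap (fun i =>
        (List.range ((s1.headD []).length)).filterMap (fun k =>
          if getE s1 (rotMapB ((s1.headD []).length) r i k).1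
              (rotMapB ((s1.headD []).length) r i k).2 = "0"
          then some (getE s2 i k) else none)))) := by
  simp only [rotatePassword_alt]
  congr 1
  set m := (s1.headD []).length
  have hmid : ∀ (out : List String) (r : Nat),
      (List.range m).foldl (fun out i =>
        (List.range m).foldl (fun out k =>
          let q := rotMapB m r i k
          if getE s1 q.1 q.2 = "0" then out ++ [getE s2 i k] else out) out) out =
      out ++ (List.range m).flatMap (fun i =>
        (List.range m).filterMap (fun k =>
          if getE s1 (rotMapB m r i k).1 (rotMapB m r i k).2 = "0"
          then some (getE s2 i k) else none)) := by
    intro out r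
    have : ∀ out i, (List.range m).foldl (fun out k =>
          let q := rotMapB m r i k
          if getE s1 q.1 q.2 = "0" then out ++ [getE s2 i k] else out) out =
        out ++ (List.range m).filterMap (fun k =>
          if getE s1 (rotMapB m r i k).1 (rotMapB m r i k).2 = "0"
          then some (getE s2 i k) else none) := fun out i => bInner s1 s2 m r i out
    calc (List.range m).foldl (fun out i =>
          (List.range m).foldl (fun out k =>
            let q := rotMapB m r i k
            if getE s1 q.1 q.2 = "0" then out ++ [getE s2 i k] else out) out) out
        = (List.range m).foldl (fun out i => out ++ (List.range m).filterMap (fun k =>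
            if getE s1 (rotMapB m r i k).1 (rotMapB m r i k).2 = "0"
            then some (getE s2 i k) else none)) out := by
          exact foldl_congr_fn _ _ _ _ (fun acc x _ => this acc x)
      _ = _ := PySem.List.foldl_append_eq_flatMap _ _ _
  have houter : ∀ (out : List String),
      (List.range 4).foldl (fun out r =>
        (List.range m).foldl (fun out i =>
          (List.range m).foldl (fun out k =>
            let q := rotMapB m r i k
            if getE s1 q.1 q.2 = "0" then out ++ [getE s2 i k] else out) out) out) out =
      out ++ (List.range 4).flatMap (fun r =>
        (List.range m).flatMap (fun i =>
          (List.range m).filterMap (fun k =>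
            if getE s1 (rotMapB m r i k).1 (rotMapB m r i k).2 = "0"
            then some (getE s2 i k) else none))) := by
    intro out
    calc _ = (List.range 4).foldl (fun out r => out ++ (List.range m).flatMap (fun i =>
          (List.range m).filterMap (fun k =>
            if getE s1 (rotMapB m r i k).1 (rotMapB m r i k).2 = "0"
            then some (getE s2 i k) else none))) out := by
          exact foldl_congr_fn _ _ _ _ (fun acc x _ => hmid acc x)
      _ = _ := PySem.List.foldl_append_eq_flatMap _ _ _
  simpa using houter []

-- zero positions of a matrix, row-major
def zerosOf (n : Nat) (t : List (List String)) : List (Nat × Nat) :=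
  (List.range n).flatMap (fun i =>
    (List.range n).filterMap (fun k => if getE t i k = "0" then some (i, k) else none))

theorem zeros_map (n : Nat) (t s2 : List (List String)) :
    (zerosOf n t).map (fun q => getE s2 q.1 q.2) =
      (List.range n).flatMap (fun i =>
        (List.range n).filterMap (fun k =>
          if getE t i k = "0" then some (getE s2 i k) else none)) := by
  simp only [zerosOf, List.map_flatMap, List.map_filterMap]
  apply List.flatMap_congr
  intro i _
  apply List.filterMap_congr
  intro k _
  by_cases h : getE t i k = "0" <;> simp [h]

-- ===== VERDICT helper: the main equivalence =====
theorem rotatePassword_spec : Claim_equal_rotatePassword := by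
  intro s1 s2 _hdom hpre
  obtain ⟨hn1, hnlen, hrows, _hs2⟩ := hpre
  unfold Spec_rotatePassword
  set n := (s1.headD []).length with hn
  -- the four rotated matrices
  have hhead0 : (s1.headD []).length = n := rfl
  have t1 := transposeA_spec n hn1 s1 hhead0 hnlen hrows
  set m1 := (transposeA s1).1 with hm1
  have hhead1 : (m1.headD []).length = n := by
    have hlen1 : m1.length = n := t1.1.1
    cases hm : m1 with
    | nil => rw [hm] at hlen1; simp at hlen1; omega
    | cons r rs =>
      have h0 := t1.1.2 0 (by omega)
      rw [hm] at h0
      simpa using h0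
  have t2 := transposeA_spec n hn1 m1 hhead1 (by rw [t1.1.1]) t1.1.2
  set m2 := (transposeA m1).1 with hm2
  have hhead2 : (m2.headD []).length = n := by
    have hlen2 : m2.length = n := t2.1.1
    cases hm : m2 with
    | nil => rw [hm] at hlen2; simp at hlen2; omega
    | cons r rs =>
      have h0 := t2.1.2 0 (by omega)
      rw [hm] at h0
      simpa using h0
  have t3 := transposeA_spec n hn1 m2 hhead2 (by rw [t2.1.1]) t2.1.2
  set m3 := (transposeA m2).1 with hm3
  have hhead3 : (m3.headD []).length = n := by
    have hlen3 : m3.length = n := t3.1.1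
    cases hm : m3 with
    | nil => rw [hm] at hlen3; simp at hlen3; omega
    | cons r rs =>
      have h0 := t3.1.2 0 (by omega)
      rw [hm] at h0
      simpa using h0
  have t4 := transposeA_spec n hn1 m3 hhead3 (by rw [t3.1.1]) t3.1.2
  -- closed-form reads
  have read1 : ∀ i k, i < n → k < n → getE m1 i k = getE s1 (n - 1 - k) i := by
    intro i k hi hk; exact t1.2.1 i k hi hk
  have read2 : ∀ i k, i < n → k < n → getE m2 i k = getE s1 (n - 1 - i) (n - 1 - k) := by
    intro i k hi hk
    rw [t2.2.1 i k hi hk, read1 (n - 1 - k) i (by omega) hi]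
  have read3 : ∀ i k, i < n → k < n → getE m3 i k = getE s1 k (n - 1 - i) := by
    intro i k hi hk
    rw [t3.2.1 i k hi hk, read2 (n - 1 - k) i (by omega) hi]
    congr 1
    omega
  -- A's accumulated list
  have hA : rotatePassword s1 s2 = String.join
      ((zerosOf n s1 ++ zerosOf n m1 ++ zerosOf n m2 ++ zerosOf n m3).map
        (fun q => getE s2 q.1 q.2)) := by
    simp only [rotatePassword]
    have hr4 : List.range 4 = [0, 1, 2, 3] := by decide
    rw [hr4]
    simp only [List.foldl_cons, List.foldl_nil]
    rw [foldl_append_join]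
    simp only [← hm1, ← hm2, ← hm3, t1.2.2, t2.2.2, t3.2.2, t4.2.2, zerosOf]
    simp [List.append_assoc]
  rw [hA, bLoops s1 s2, ← hn]
  congr 1
  have hr4 : List.range 4 = [0, 1, 2, 3] := by decide
  rw [hr4]
  simp only [List.flatMap_cons, List.flatMap_nil, List.append_nil, List.map_append,
    List.append_assoc]
  have hpiece : ∀ (t : List (List String)) (r : Nat),
      (∀ i k, i < n → k < n → getE t i k = getE s1 (rotMapB n r i k).1 (rotMapB n r i k).2) →
      (zerosOf n t).map (fun q => getE s2 q.1 q.2) =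
        (List.range n).flatMap (fun i => (List.range n).filterMap (fun k =>
          if getE s1 (rotMapB n r i k).1 (rotMapB n r i k).2 = "0"
          then some (getE s2 i k) else none)) := by
    intro t r hread
    rw [zeros_map]
    apply List.flatMap_congr
    intro i hi
    rw [List.mem_range] at hi
    apply List.filterMap_congr
    intro k hk
    rw [List.mem_range] at hk
    rw [hread i k hi hk]
  rw [hpiece s1 0 (fun i k _ _ => rfl),
    hpiece m1 1 (fun i k hi hk => read1 i k hi hk),
    hpiece m2 2 (fun i k hi hk => read2 i k hi hk),
    hpiece m3 3 (fun i k hi hk => read3 i k hi hk)]
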